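-- pv_equiv track=rewrite | github.com/Bruno-rasq/Beecrowd-solutions | Ad-Hoc/1559/1559.py | move_row
-- ===== SOURCE A (Python) =====
-- def move_row(board_row, left=True):
--     if left:
--         for i in range(3):
--             j = i + 1
--             # movimento possível se:
--             # - célula à esquerda está vazia mas à direita tem número
--             if board_row[i] == 0 and board_row[j] != 0: return True
--
--             # - células adjacentes são iguais
--             if board_row[i] == board_row[j] and board_row[i] != 0:
--                 return True
--     else:
--
--         for i in range(3, 0, -1):
--             j = i - 1
--             if board_row[i] == 0 and board_row[j] != 0: return True
--             if board_row[i] == board_row[j] and board_row[i] != 0: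
--                 return True
--
--     return False
-- ===== SOURCE B (Python) =====
-- def _merge(tiles):
--     if len(tiles) >= 2 and tiles[0] == tiles[1]:
--         return [2 * tiles[0]] + _merge(tiles[2:])
--     if tiles:
--         return [tiles[0]] + _merge(tiles[1:])
--     return []
--
-- def move_row(board_row, left=True):
--     row = board_row[:4]
--     tiles = [x for x in row if x != 0]
--     if not left:
--         tiles = tiles[::-1]
--     merged = _merge(tiles)
--     if left:
--         new = merged + [0] * (len(row) - len(merged))
--     else:
--         new = [0] * (len(row) - len(merged)) + merged[::-1]
--     return new != row
-- ===== Notes on version B (the rewrite author's own statement) =====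
-- stated objective: alternative
-- what changed: B simulates the actual 2048 move on the row's four cells (extract nonzero tiles, merge equal adjacent pairs once, re-pad with zeros on the appropriate side) and returns whether the result differs from the row, instead of A's scan of adjacent index pairs for move/merge conditions. Pre_ excludes rows shorter than 4 cells, where A raises IndexError unless an early pair test happens to return True first.
-- outside the precondition, e.g. on move_row([0, 5, 1], True): A returns True, B returns True; on move_row([1, 2, 3], True): A raises IndexError, B returns False
import Mathlib
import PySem

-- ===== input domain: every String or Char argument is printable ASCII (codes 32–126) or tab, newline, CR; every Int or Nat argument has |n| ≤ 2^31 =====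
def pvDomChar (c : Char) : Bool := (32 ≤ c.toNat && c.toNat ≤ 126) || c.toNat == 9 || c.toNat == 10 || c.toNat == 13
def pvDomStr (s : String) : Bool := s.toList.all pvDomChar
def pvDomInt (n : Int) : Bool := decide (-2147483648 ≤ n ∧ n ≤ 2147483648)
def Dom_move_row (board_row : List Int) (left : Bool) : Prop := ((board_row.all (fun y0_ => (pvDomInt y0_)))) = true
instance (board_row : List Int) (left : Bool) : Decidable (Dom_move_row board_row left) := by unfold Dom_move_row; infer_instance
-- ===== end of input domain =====

-- B simulates the actual 2048 move (compress, merge once, pad) on the first four cells and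
-- compares with the row, instead of A's adjacent-pair scan; objective: alternative algorithm.

-- ===== PORT A =====
-- A's left loop: for i in range(3): j = i+1; the two if-return tests, else continue.
def pvAScanL (xs : List Int) : List Int → Bool
  | [] => false
  | i :: rest =>
    let vi := (PySem.List.pyGet? xs i).getD 0
    let vj := (PySem.List.pyGet? xs (i + 1)).getD 0
    if vi == 0 && vj != 0 then true
    else if vi == vj && vi != 0 then true
    else pvAScanL xs rest

-- A's right loop: for i in range(3, 0, -1): j = i-1.
def pvAScanR (xs : List Int) : List Int → Bool
  | [] => false
  | i :: rest =>
    let vi := (PySem.List.pyGet? xs i).getD 0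
    let vj := (PySem.List.pyGet? xs (i - 1)).getD 0
    if vi == 0 && vj != 0 then true
    else if vi == vj && vi != 0 then true
    else pvAScanR xs rest

def move_row (board_row : List Int) (left : Bool) : Bool :=
  if left then pvAScanL board_row (PySem.List.pyRange 0 3 1)
  else pvAScanR board_row (PySem.List.pyRange 3 0 (-1))

-- ===== PORT B =====
-- Source B's _merge: merge equal adjacent tiles exactly once, left to right.
def pvMerge : List Int → List Int
  | [] => []
  | [x] => [x]
  | x :: y :: t => if x == y then (2 * x) :: pvMerge t else x :: pvMerge (y :: t)

def move_row_alt (board_row : List Int) (left : Bool) : Bool :=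
  let row := PySem.List.slice board_row none (some 4)
  let tiles0 := row.filter (fun x => x != 0)
  let tiles := if left then tiles0 else tiles0.reverse
  let merged := pvMerge tiles
  let newr := if left then merged ++ List.replicate (row.length - merged.length) 0
              else List.replicate (row.length - merged.length) 0 ++ merged.reverse
  newr != row

-- ===== PRECONDITION & SPEC =====
-- Pre_ excludes rows shorter than the 4 cells A's hard-coded indices 0..3 assume: there A raises
-- IndexError unless an early pair test already returned True, so its value is an accident of the scan order.
def Pre_move_row (board_row : List Int) (left : Bool) : Prop := 4 ≤ board_row.length
instance (board_row : List Int) (left : Bool) : Decidable (Pre_move_row board_row left) := by unfold Pre_move_row; infer_instance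
def pvWitness_move_row : List Int × Bool := ([2, 2, 0, 4], true)

def Spec_move_row (board_row : List Int) (left : Bool) (out : Bool) : Prop := out = move_row_alt board_row left
instance (board_row : List Int) (left : Bool) (out : Bool) : Decidable (Spec_move_row board_row left out) := by unfold Spec_move_row; infer_instance

-- ===== CLAIM =====
def Claim_equal_move_row : Prop := ∀ (board_row : List Int) (left : Bool), Dom_move_row board_row left → Pre_move_row board_row left → Spec_move_row board_row left (move_row board_row left)

-- ===== LEMMAS AND PROOFS =====
set_option maxHeartbeats 1000000 in
lemma pv_key (a b c d : Int) (rest : List Int) (left : Bool) :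
    move_row (a :: b :: c :: d :: rest) left = move_row_alt (a :: b :: c :: d :: rest) left := by
  have g0 : (PySem.List.pyGet? (a::b::c::d::rest) 0).getD 0 = a := by
    simp [PySem.List.pyGet?, PySem.List.pyIdx?]; rw [if_pos (by omega)]; simp
  have g1 : (PySem.List.pyGet? (a::b::c::d::rest) 1).getD 0 = b := by
    simp [PySem.List.pyGet?, PySem.List.pyIdx?]; rw [if_pos (by omega)]; simp
  have g2 : (PySem.List.pyGet? (a::b::c::d::rest) 2).getD 0 = c := by
    simp [PySem.List.pyGet?, PySem.List.pyIdx?]; rw [if_pos (by omega)]; simp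
  have g3 : (PySem.List.pyGet? (a::b::c::d::rest) 3).getD 0 = d := by
    simp [PySem.List.pyGet?, PySem.List.pyIdx?]; rw [if_pos (by omega)]; simp
  have hr : PySem.List.pyRange 0 3 1 = [0, 1, 2] := by decide
  have hr' : PySem.List.pyRange 3 0 (-1) = [3, 2, 1] := by decide
  have hs : PySem.List.slice (a::b::c::d::rest) none (some 4) = [a, b, c, d] := by
    simp [pysem]
  cases left <;>
  · simp only [move_row, move_row_alt, hr, hr', hs, if_true, if_false, Bool.false_eq_true]
    simp only [pvAScanL, pvAScanR]
    norm_num [g0, g1, g2, g3]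
    by_cases ha : a = 0 <;> by_cases hb : b = 0 <;> by_cases hc : c = 0 <;> by_cases hd : d = 0 <;>
      simp_all [pvMerge] <;> split_ifs <;> simp_all

-- ===== VERDICT =====
theorem move_row_spec : Claim_equal_move_row := by
  intro board_row left _ hpre
  unfold Spec_move_row
  match board_row, hpre with
  | a :: b :: c :: d :: rest, _ => exact pv_key a b c d rest left
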